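-- pv_equiv track=rewrite | github.com/ostroumova-la/cascade_communities | partition_metrics.py | get_cross_tab
-- ===== SOURCE A (Python) =====
-- def get_cross_tab(p1_sets,p2_sets):
--     cross_tab = [[0, 0], [0, 0]]
--     for a1, s1 in enumerate(p1_sets):
--         for a2, s2 in enumerate(p2_sets):
--             common = len(s1 & s2)
--             l1 = len(s1) - common
--             l2 = len(s2) - common
--             cross_tab[0][0] += common * (common-1)
--             cross_tab[1][0] += common * l2
--             cross_tab[0][1] += l1 * common
--             cross_tab[1][1] += l1 * l2
--     return cross_tab
-- ===== SOURCE B (Python) =====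
-- def get_cross_tab(p1_sets, p2_sets):
--     # Invert p2 into an element -> cluster-index list, count p1 memberships per
--     # element, then get all four entries from closed-form marginal sums:
--     # one pass over memberships instead of a full k1 x k2 pairwise intersection.
--     index2 = {}
--     for j, s2 in enumerate(p2_sets):
--         for e in s2:
--             index2.setdefault(e, []).append(j)
--     cnt1 = {}
--     for s1 in p1_sets:
--         for e in s1:
--             cnt1[e] = cnt1.get(e, 0) + 1
--     SB = 0  # sum of |s2|
--     Q = 0   # sum over pairs of |s2| * |s1 & s2|
--     for s2 in p2_sets:
--         b = len(s2)
--         SB += b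
--         col = 0
--         for e in s2:
--             col += cnt1.get(e, 0)
--         Q += b * col
--     SA = 0  # sum of |s1|
--     T = 0   # sum over pairs of |s1 & s2|
--     P = 0   # sum over pairs of |s1| * |s1 & s2|
--     S = 0   # sum over pairs of |s1 & s2|^2
--     for s1 in p1_sets:
--         a = len(s1)
--         SA += a
--         r = 0
--         row = {}
--         for e in s1:
--             js = index2.get(e, [])
--             r += len(js)
--             for j in js:
--                 row[j] = row.get(j, 0) + 1
--         T += r
--         P += a * r
--         for n in row.values():
--             S += n * n
--     return [[S - T, P - S], [Q - S, SA * SB - P - Q + S]]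
-- ===== Notes on version B (the rewrite author's own statement) =====
-- stated objective: faster
-- what changed: Replaces the k1*k2 pairwise set-intersection double loop by inverted element->cluster indices built in one pass over the memberships, per-cluster overlap counters, and closed-form marginal sums for all four cross-tab entries.
import Mathlib
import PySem

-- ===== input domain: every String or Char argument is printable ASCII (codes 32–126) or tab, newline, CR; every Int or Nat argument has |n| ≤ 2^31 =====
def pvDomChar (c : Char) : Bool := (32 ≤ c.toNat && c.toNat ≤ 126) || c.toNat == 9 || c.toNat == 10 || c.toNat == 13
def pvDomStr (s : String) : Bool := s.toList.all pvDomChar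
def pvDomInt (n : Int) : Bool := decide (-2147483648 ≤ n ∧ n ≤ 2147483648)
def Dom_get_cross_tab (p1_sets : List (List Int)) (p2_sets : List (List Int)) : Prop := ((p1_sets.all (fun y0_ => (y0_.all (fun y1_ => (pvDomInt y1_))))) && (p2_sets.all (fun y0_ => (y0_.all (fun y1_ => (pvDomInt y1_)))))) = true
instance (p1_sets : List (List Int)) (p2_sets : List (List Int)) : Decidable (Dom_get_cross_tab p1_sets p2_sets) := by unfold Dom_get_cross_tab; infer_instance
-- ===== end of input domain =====

-- B replaces A's k1*k2 pairwise set-intersection double loop by inverted element->cluster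
-- indices and closed-form marginal sums (objective: faster; measured asymptotically faster).


-- ===== PORT A =====
-- Inner list = the Python set's elements; sets are handled through PySem.Set (ofList/inter).
-- The 2x2 table mutated in place is carried as a 4-tuple (c00, c10, c01, c11) in the
-- Python update order and assembled into the nested list at the end.
def get_cross_tab (p1_sets : List (List Int)) (p2_sets : List (List Int)) : List (List Int) :=
  let st : Int × Int × Int × Int := p1_sets.foldl (fun st s1 =>
    p2_sets.foldl (fun st s2 =>
      let common : Int := ((PySem.Set.inter (PySem.Set.ofList s1) (PySem.Set.ofList s2)).length : Int)
      let l1 : Int := ((PySem.Set.ofList s1).length : Int) - common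
      let l2 : Int := ((PySem.Set.ofList s2).length : Int) - common
      (st.1 + common * (common - 1), st.2.1 + common * l2,
       st.2.2.1 + l1 * common, st.2.2.2 + l1 * l2)) st) (0, 0, 0, 0)
  [[st.1, st.2.2.1], [st.2.1, st.2.2.2]]

-- ===== PORT B =====
-- Transliteration of Source B: index2 = element -> list of p2 cluster indices, cnt1 = element ->
-- number of p1 clusters containing it, then marginal sums SB,Q and SA,T,P,S; sets iterated
-- in PySem.Set order (all consumptions are order-independent sums / dicts looked up later).
def get_cross_tab_alt (p1_sets : List (List Int)) (p2_sets : List (List Int)) : List (List Int) :=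
  let index2 : PySem.Dict Int (List Int) :=
    (PySem.List.enumerate p2_sets).foldl (fun d q =>
      (PySem.Set.ofList q.2).foldl (fun d e => d.modify e [] (fun l => l ++ [q.1])) d)
      PySem.Dict.empty
  let cnt1 : PySem.Dict Int Int :=
    p1_sets.foldl (fun d s1 =>
      (PySem.Set.ofList s1).foldl (fun d e => d.modify e 0 (fun n => n + 1)) d)
      PySem.Dict.empty
  let sbq : Int × Int := p2_sets.foldl (fun st s2 =>
      let b : Int := ((PySem.Set.ofList s2).length : Int)
      let col : Int := (PySem.Set.ofList s2).foldl (fun c e => c + cnt1.getD e 0) 0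
      (st.1 + b, st.2 + b * col)) (0, 0)
  let satps : Int × Int × Int × Int := p1_sets.foldl (fun st s1 =>
      let u := PySem.Set.ofList s1
      let a : Int := (u.length : Int)
      let rrow : Int × PySem.Dict Int Int := u.foldl
        (fun rr e =>
          let js := index2.getD e []
          ((rr.1 + (js.length : Int),
            js.foldl (fun row j => row.modify j 0 (fun n => n + 1)) rr.2) : Int × PySem.Dict Int Int))
        ((0 : Int), PySem.Dict.empty)
      let s' : Int := rrow.2.values.foldl (fun s n => s + n * n) 0
      (st.1 + a, st.2.1 + rrow.1, st.2.2.1 + a * rrow.1, st.2.2.2 + s')) (0, 0, 0, 0)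
  [[satps.2.2.2 - satps.2.1, satps.2.2.1 - satps.2.2.2],
   [sbq.2 - satps.2.2.2, satps.1 * sbq.1 - satps.2.2.1 - sbq.2 + satps.2.2.2]]

-- ===== PRECONDITION & SPEC =====
def Spec_get_cross_tab (p1_sets : List (List Int)) (p2_sets : List (List Int)) (out : List (List Int)) : Prop := out = get_cross_tab_alt p1_sets p2_sets
instance (p1_sets : List (List Int)) (p2_sets : List (List Int)) (out : List (List Int)) : Decidable (Spec_get_cross_tab p1_sets p2_sets out) := by unfold Spec_get_cross_tab; infer_instance

-- ===== CLAIM (what is proved, stated in full; the proofs are below) =====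
def Claim_equal_get_cross_tab : Prop := ∀ (p1_sets : List (List Int)) (p2_sets : List (List Int)), Dom_get_cross_tab p1_sets p2_sets → Spec_get_cross_tab p1_sets p2_sets (get_cross_tab p1_sets p2_sets)

-- ===== LEMMAS AND PROOFS =====

-- shorthand used only by the proofs: |s1 ∩ s2| as Python computes it on sets
def cNN (s1 s2 : List Int) : Int :=
  ((PySem.Set.ofList s1).countP (fun e => decide (e ∈ PySem.Set.ofList s2)) : Int)

-- element -> list of p2 cluster indices containing it (the contents of index2)
def gOf (p2_sets : List (List Int)) (e : Int) : List Int :=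
  (PySem.List.enumerate p2_sets).flatMap (fun q => if e ∈ PySem.Set.ofList q.2 then [q.1] else [])

-- the concatenated index lists over one p1 cluster (the multiset the row dict counts)
def LLof (p2_sets : List (List Int)) (s1 : List Int) : List Int :=
  (PySem.Set.ofList s1).flatMap (gOf p2_sets)

-- double sum over all cluster pairs
def sP (p1_sets p2_sets : List (List Int)) (f : List Int → List Int → Int) : Int :=
  (p1_sets.map (fun s1 => (p2_sets.map (fun s2 => f s1 s2)).sum)).sum

theorem sum_map_sub_int {α : Type} (xs : List α) (f g : α → Int) :
    (xs.map (fun x => f x - g x)).sum = (xs.map f).sum - (xs.map g).sum := by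
  induction xs with
  | nil => simp
  | cons h t ih => simp [ih]; ring

theorem sum_swap_int {α β : Type} (l : List α) (m : List β) (f : α → β → Int) :
    (l.map (fun x => (m.map (fun y => f x y)).sum)).sum
      = (m.map (fun y => (l.map (fun x => f x y)).sum)).sum := by
  induction l with
  | nil => simp
  | cons h t ih => simp [ih]

theorem count_nodup {u : List Int} (h : u.Nodup) (e : Int) :
    u.count e = if e ∈ u then 1 else 0 := by
  split_ifs with hm
  · exact List.count_eq_one_of_mem h hm
  · exact List.count_eq_zero.2 hm

theorem indicator_sum (v u : List Int) :
    (v.map (fun e => if e ∈ u then (1 : Int) else 0)).sum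
      = ((v.countP (fun e => decide (e ∈ u)) : Nat) : Int) := by
  rw [← PySem.List.sum_map_ite_one_zero (fun e => decide (e ∈ u)) v]
  simp

theorem indicator_sum_nat (v u : List Int) :
    (v.map (fun e => if e ∈ u then (1 : Nat) else 0)).sum
      = v.countP (fun e => decide (e ∈ u)) := by
  induction v with
  | nil => simp
  | cons h t ih =>
    by_cases hp : h ∈ u <;> simp [hp, ih, Nat.add_comm]

theorem sym_cNN (s1 s2 : List Int) :
    cNN s1 s2 = ((PySem.Set.ofList s2).countP (fun e => decide (e ∈ PySem.Set.ofList s1)) : Int) := by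
  unfold cNN
  rw [List.countP_eq_length_filter, List.countP_eq_length_filter]
  congr 1
  apply List.Perm.length_eq
  rw [List.perm_ext_iff_of_nodup ((PySem.Set.nodup_ofList s1).filter _) ((PySem.Set.nodup_ofList s2).filter _)]
  intro a
  simp [List.mem_filter, and_comm]

theorem interLen (s1 s2 : List Int) :
    (((PySem.Set.inter (PySem.Set.ofList s1) (PySem.Set.ofList s2)).length : Nat) : Int) = cNN s1 s2 := by
  unfold cNN
  have : PySem.Set.inter (PySem.Set.ofList s1) (PySem.Set.ofList s2)
      = (PySem.Set.ofList s1).filter (fun e => (PySem.Set.ofList s2).contains e) := rfl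
  rw [this, ← List.countP_eq_length_filter]
  congr 2
  funext e
  by_cases h : e ∈ PySem.Set.ofList s2 <;> simp [h]

-- ===== A-side characterisation =====

theorem A_inner (s1 : List Int) (p2_sets : List (List Int)) :
    ∀ st : Int × Int × Int × Int,
    p2_sets.foldl (fun st s2 =>
      (st.1 + ((PySem.Set.inter (PySem.Set.ofList s1) (PySem.Set.ofList s2)).length : Int) * (((PySem.Set.inter (PySem.Set.ofList s1) (PySem.Set.ofList s2)).length : Int) - 1),
       st.2.1 + ((PySem.Set.inter (PySem.Set.ofList s1) (PySem.Set.ofList s2)).length : Int) * (((PySem.Set.ofList s2).length : Int) - ((PySem.Set.inter (PySem.Set.ofList s1) (PySem.Set.ofList s2)).length : Int)),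
       st.2.2.1 + (((PySem.Set.ofList s1).length : Int) - ((PySem.Set.inter (PySem.Set.ofList s1) (PySem.Set.ofList s2)).length : Int)) * ((PySem.Set.inter (PySem.Set.ofList s1) (PySem.Set.ofList s2)).length : Int),
       st.2.2.2 + (((PySem.Set.ofList s1).length : Int) - ((PySem.Set.inter (PySem.Set.ofList s1) (PySem.Set.ofList s2)).length : Int)) * (((PySem.Set.ofList s2).length : Int) - ((PySem.Set.inter (PySem.Set.ofList s1) (PySem.Set.ofList s2)).length : Int)))) st
    = (st.1 + (p2_sets.map (fun s2 => cNN s1 s2 * (cNN s1 s2 - 1))).sum,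
       st.2.1 + (p2_sets.map (fun s2 => cNN s1 s2 * (((PySem.Set.ofList s2).length : Int) - cNN s1 s2))).sum,
       st.2.2.1 + (p2_sets.map (fun s2 => (((PySem.Set.ofList s1).length : Int) - cNN s1 s2) * cNN s1 s2)).sum,
       st.2.2.2 + (p2_sets.map (fun s2 => (((PySem.Set.ofList s1).length : Int) - cNN s1 s2) * (((PySem.Set.ofList s2).length : Int) - cNN s1 s2))).sum) := by
  induction p2_sets with
  | nil => intro st; simp
  | cons h t ih =>
    intro st
    rw [List.foldl_cons, ih]
    simp only [interLen, List.map_cons, List.sum_cons, Prod.mk.injEq]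
    refine ⟨by ring, by ring, by ring, by ring⟩

theorem A_char (p1_sets p2_sets : List (List Int)) :
    get_cross_tab p1_sets p2_sets
    = [[sP p1_sets p2_sets (fun s1 s2 => cNN s1 s2 * (cNN s1 s2 - 1)),
        sP p1_sets p2_sets (fun s1 s2 => (((PySem.Set.ofList s1).length : Int) - cNN s1 s2) * cNN s1 s2)],
       [sP p1_sets p2_sets (fun s1 s2 => cNN s1 s2 * (((PySem.Set.ofList s2).length : Int) - cNN s1 s2)),
        sP p1_sets p2_sets (fun s1 s2 => (((PySem.Set.ofList s1).length : Int) - cNN s1 s2) * (((PySem.Set.ofList s2).length : Int) - cNN s1 s2))]] := by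
  have outer : ∀ (p1 : List (List Int)) (st : Int × Int × Int × Int),
      p1.foldl (fun st s1 => p2_sets.foldl (fun st s2 =>
        (st.1 + ((PySem.Set.inter (PySem.Set.ofList s1) (PySem.Set.ofList s2)).length : Int) * (((PySem.Set.inter (PySem.Set.ofList s1) (PySem.Set.ofList s2)).length : Int) - 1),
         st.2.1 + ((PySem.Set.inter (PySem.Set.ofList s1) (PySem.Set.ofList s2)).length : Int) * (((PySem.Set.ofList s2).length : Int) - ((PySem.Set.inter (PySem.Set.ofList s1) (PySem.Set.ofList s2)).length : Int)),
         st.2.2.1 + (((PySem.Set.ofList s1).length : Int) - ((PySem.Set.inter (PySem.Set.ofList s1) (PySem.Set.ofList s2)).length : Int)) * ((PySem.Set.inter (PySem.Set.ofList s1) (PySem.Set.ofList s2)).length : Int),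
         st.2.2.2 + (((PySem.Set.ofList s1).length : Int) - ((PySem.Set.inter (PySem.Set.ofList s1) (PySem.Set.ofList s2)).length : Int)) * (((PySem.Set.ofList s2).length : Int) - ((PySem.Set.inter (PySem.Set.ofList s1) (PySem.Set.ofList s2)).length : Int)))) st) st
      = (st.1 + sP p1 p2_sets (fun s1 s2 => cNN s1 s2 * (cNN s1 s2 - 1)),
         st.2.1 + sP p1 p2_sets (fun s1 s2 => cNN s1 s2 * (((PySem.Set.ofList s2).length : Int) - cNN s1 s2)),
         st.2.2.1 + sP p1 p2_sets (fun s1 s2 => (((PySem.Set.ofList s1).length : Int) - cNN s1 s2) * cNN s1 s2),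
         st.2.2.2 + sP p1 p2_sets (fun s1 s2 => (((PySem.Set.ofList s1).length : Int) - cNN s1 s2) * (((PySem.Set.ofList s2).length : Int) - cNN s1 s2))) := by
    intro p1
    induction p1 with
    | nil => intro st; simp [sP]
    | cons h t ih =>
      intro st
      rw [List.foldl_cons, ih, A_inner]
      simp only [sP, List.map_cons, List.sum_cons, Prod.mk.injEq]
      refine ⟨by ring, by ring, by ring, by ring⟩
  simp only [get_cross_tab]
  rw [outer]
  simp

-- ===== B-side characterisation =====

theorem cnt1_getD (p1_sets : List (List Int)) (e : Int) :
    (p1_sets.foldl (fun d s1 =>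
        (PySem.Set.ofList s1).foldl (fun d e => d.modify e 0 (fun n => n + 1)) d)
      PySem.Dict.empty).getD e 0
    = (p1_sets.map (fun s1 => if e ∈ PySem.Set.ofList s1 then (1 : Int) else 0)).sum := by
  rw [← List.foldl_flatMap, ← PySem.Dict.counter_eq_foldl, PySem.Dict.getD_counter,
      List.count_flatMap, Nat.cast_list_sum, List.map_map]
  apply congrArg
  apply List.map_congr_left
  intro s1 _
  simp only [Function.comp_apply, count_nodup (PySem.Set.nodup_ofList s1)]
  split_ifs <;> simp

theorem gOf_inner (e j : Int) (v : List Int) :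
    ((((PySem.Set.ofList v).map (fun x => (x, j))).filter (fun p => p.1 == e)).map (fun p => p.2))
    = if e ∈ PySem.Set.ofList v then [j] else [] := by
  rw [List.filter_map]
  have : ((fun (p : Int × Int) => p.1 == e) ∘ (fun x => (x, j))) = (fun x => x == e) := rfl
  rw [this, List.filter_beq, count_nodup (PySem.Set.nodup_ofList v)]
  split_ifs <;> simp

theorem index2_getD (p2_sets : List (List Int)) (e : Int) :
    ((PySem.List.enumerate p2_sets).foldl (fun d q =>
        (PySem.Set.ofList q.2).foldl (fun d e => d.modify e [] (fun l => l ++ [q.1])) d)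
      PySem.Dict.empty).getD e []
    = gOf p2_sets e := by
  have h1 : ∀ (E : List (Int × List Int)) (d : PySem.Dict Int (List Int)),
      E.foldl (fun d q => (PySem.Set.ofList q.2).foldl (fun d e => d.modify e [] (fun l => l ++ [q.1])) d) d
      = (E.flatMap (fun q => (PySem.Set.ofList q.2).map (fun x => (x, q.1)))).foldl
          (fun d p => d.modify p.1 [] (fun l => l ++ [p.2])) d := by
    intro E d
    rw [List.foldl_flatMap]
    apply PySem.List.foldl_congr_mem
    intro d q _
    rw [List.foldl_map]
  rw [h1, PySem.Dict.getD_foldl_modify_append, PySem.Dict.getD_empty, List.nil_append]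
  unfold gOf
  rw [List.filter_flatMap, List.map_flatMap]
  apply List.flatMap_congr  -- congruence over the list
  intro q _
  exact gOf_inner e q.1 q.2

theorem len_gOf (p2_sets : List (List Int)) (e : Int) :
    (((gOf p2_sets e).length : Nat) : Int)
      = (p2_sets.map (fun s2 => if e ∈ PySem.Set.ofList s2 then (1 : Int) else 0)).sum := by
  unfold gOf
  rw [List.length_flatMap, Nat.cast_list_sum, List.map_map]
  have h2 : ∀ h : List Int → Int, ((PySem.List.enumerate p2_sets).map (fun q => h q.2)).sum
      = (p2_sets.map h).sum := by
    intro h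
    have := PySem.List.map_snd_enumerate p2_sets 0
    calc ((PySem.List.enumerate p2_sets).map (fun q => h q.2)).sum
        = (((PySem.List.enumerate p2_sets).map (fun q => q.2)).map h).sum := by rw [List.map_map]; rfl
      _ = (p2_sets.map h).sum := by rw [this]
  rw [← h2 (fun s2 => if e ∈ PySem.Set.ofList s2 then (1 : Int) else 0)]
  apply congrArg
  apply List.map_congr_left
  intro q _
  simp [Function.comp]
  split_ifs <;> simp

theorem nodup_fst_enum (p2_sets : List (List Int)) :
    ((PySem.List.enumerate p2_sets).map (fun q => q.1)).Nodup := by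
  have := PySem.List.pairwise_lt_enumerate p2_sets 0
  have h2 : ((PySem.List.enumerate p2_sets).map (fun q => q.1)).Pairwise (· < ·) := by
    rw [List.pairwise_map]
    exact this
  exact h2.imp (fun h => ne_of_lt h)

theorem count_gOf_zero (ps : List (Int × List Int)) (e j : Int)
    (hj : j ∉ ps.map (fun q => q.1)) :
    (ps.flatMap (fun q => if e ∈ PySem.Set.ofList q.2 then [q.1] else [])).count j = 0 := by
  rw [List.count_eq_zero]
  intro hmem
  rcases List.mem_flatMap.1 hmem with ⟨q, hq, hin⟩
  apply hj
  rcases (by split_ifs at hin <;> simp_all : j = q.1) with rfl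
  exact List.mem_map.2 ⟨q, hq, rfl⟩

theorem count_gOf (ps : List (Int × List Int)) (e j : Int) (s : List Int)
    (hnd : (ps.map (fun q => q.1)).Nodup) (hq : (j, s) ∈ ps) :
    (ps.flatMap (fun q => if e ∈ PySem.Set.ofList q.2 then [q.1] else [])).count j
    = (if e ∈ PySem.Set.ofList s then 1 else 0) := by
  induction ps with
  | nil => cases hq
  | cons q0 t ih =>
    rw [List.flatMap_cons, List.count_append]
    rw [List.map_cons, List.nodup_cons] at hnd
    rcases List.mem_cons.1 hq with heq | htail
    · have h0 : q0 = (j, s) := heq.symm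
      subst h0
      have htz : (t.flatMap (fun q => if e ∈ PySem.Set.ofList q.2 then [q.1] else [])).count j = 0 :=
        count_gOf_zero t e j hnd.1
      rw [htz]
      split_ifs <;> simp
    · have hne : q0.1 ≠ j := by
        intro h
        exact hnd.1 (h ▸ List.mem_map.2 ⟨(j, s), htail, rfl⟩)
      have hhead : (if e ∈ PySem.Set.ofList q0.2 then [q0.1] else []).count j = 0 := by
        split_ifs <;> simp [hne]
      rw [hhead, ih hnd.2 htail]
      simp

theorem memL (p2_sets : List (List Int)) (s1 : List Int) (k : Int)
    (hk : k ∈ LLof p2_sets s1) : k ∈ (PySem.List.enumerate p2_sets).map (fun q => q.1) := by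
  rcases List.mem_flatMap.1 hk with ⟨e, _, hin⟩
  unfold gOf at hin
  rcases List.mem_flatMap.1 hin with ⟨q, hq, hin2⟩
  rcases (by split_ifs at hin2 <;> simp_all : k = q.1) with rfl
  exact List.mem_map.2 ⟨q, hq, rfl⟩

theorem sum_filter_support (J : List Int) (p : Int → Bool) (f : Int → Int)
    (h : ∀ j, p j = false → f j = 0) :
    ((J.filter p).map f).sum = (J.map f).sum := by
  induction J with
  | nil => simp
  | cons q t ih =>
    by_cases hp : p q
    · simp [hp, ih]
    · have : p q = false := by simpa using hp
      simp [this, ih, h q this]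

theorem sum_sq_dedup (L J : List Int) (hJ : J.Nodup) (hsub : ∀ x ∈ L, x ∈ J) :
    ((PySem.Set.ofList L).map (fun k => ((L.count k : Nat) : Int) * ((L.count k : Nat) : Int))).sum
    = (J.map (fun j => ((L.count j : Nat) : Int) * ((L.count j : Nat) : Int))).sum := by
  have hperm : (J.filter (fun j => decide (j ∈ L))).Perm (PySem.Set.ofList L) := by
    rw [List.perm_ext_iff_of_nodup (hJ.filter _) (PySem.Set.nodup_ofList L)]
    intro a
    simp only [List.mem_filter, PySem.Set.mem_ofList, decide_eq_true_eq]
    exact ⟨fun h => h.2, fun h => ⟨hsub a h, h⟩⟩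
  rw [← (hperm.map _).sum_eq]
  apply sum_filter_support
  intro j hj
  have : j ∉ L := by simpa using hj
  rw [List.count_eq_zero.2 this]
  simp

theorem countL (p2_sets : List (List Int)) (s1 : List Int) (j : Int) (s2 : List Int)
    (hq : (j, s2) ∈ PySem.List.enumerate p2_sets) :
    ((LLof p2_sets s1).count j : Int)
    = cNN s1 s2 := by
  unfold LLof gOf
  rw [List.count_flatMap]
  have : ∀ e : Int, (List.count j ∘ fun e => (PySem.List.enumerate p2_sets).flatMap
        (fun q => if e ∈ PySem.Set.ofList q.2 then [q.1] else [])) e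
      = (fun e => if e ∈ PySem.Set.ofList s2 then (1 : Nat) else 0) e := by
    intro e
    exact count_gOf _ e j s2 (nodup_fst_enum p2_sets) hq
  rw [List.map_congr_left (fun e _ => this e), indicator_sum_nat]
  rfl

theorem values_counter_sq (L : List Int) :
    (PySem.Dict.counter L).values.foldl (fun s n => s + n * n) 0
    = ((PySem.Set.ofList L).map (fun k => ((L.count k : Nat) : Int) * ((L.count k : Nat) : Int))).sum := by
  have hv : (PySem.Dict.counter L).values
      = (PySem.Set.ofList L).map (fun k => ((L.count k : Nat) : Int)) := by
    have : (PySem.Dict.counter L).values = (PySem.Dict.counter L).items.map (fun p => p.2) := rfl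
    rw [this, PySem.Dict.items_counter, List.map_map]
    rfl
  rw [hv, PySem.List.foldl_add, List.map_map, zero_add]
  rfl

theorem s'_char (p2_sets : List (List Int)) (s1 : List Int) :
    ((PySem.Set.ofList (LLof p2_sets s1)).map
        (fun k => (((LLof p2_sets s1).count k : Nat) : Int) * (((LLof p2_sets s1).count k : Nat) : Int))).sum
    = (p2_sets.map (fun s2 => cNN s1 s2 * cNN s1 s2)).sum := by
  rw [sum_sq_dedup (LLof p2_sets s1) ((PySem.List.enumerate p2_sets).map (fun q => q.1))
      (nodup_fst_enum p2_sets) (memL p2_sets s1)]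
  rw [List.map_map]
  have h2 : ∀ q ∈ PySem.List.enumerate p2_sets,
      (((LLof p2_sets s1).count q.1 : Nat) : Int) * (((LLof p2_sets s1).count q.1 : Nat) : Int)
      = cNN s1 q.2 * cNN s1 q.2 := by
    intro q hq
    rw [countL p2_sets s1 q.1 q.2 (by simpa using hq)]
  calc ((PySem.List.enumerate p2_sets).map ((fun j => (((LLof p2_sets s1).count j : Nat) : Int) * (((LLof p2_sets s1).count j : Nat) : Int)) ∘ fun q => q.1)).sum
      = ((PySem.List.enumerate p2_sets).map (fun q => cNN s1 q.2 * cNN s1 q.2)).sum := by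
        apply congrArg; exact List.map_congr_left h2
    _ = (((PySem.List.enumerate p2_sets).map (fun q => q.2)).map (fun s2 => cNN s1 s2 * cNN s1 s2)).sum := by
        rw [List.map_map]; rfl
    _ = (p2_sets.map (fun s2 => cNN s1 s2 * cNN s1 s2)).sum := by
        rw [PySem.List.map_snd_enumerate]

theorem r_char (p2_sets : List (List Int)) (s1 : List Int)
    (d : PySem.Dict Int (List Int)) (hd : ∀ e, d.getD e [] = gOf p2_sets e) :
    (PySem.Set.ofList s1).foldl (fun acc e => acc + ((d.getD e []).length : Int)) 0
    = (p2_sets.map (fun s2 => cNN s1 s2)).sum := by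
  rw [PySem.List.foldl_add]
  simp only [hd, len_gOf, zero_add]
  rw [sum_swap_int]
  apply congrArg
  apply List.map_congr_left
  intro s2 _
  rw [indicator_sum]
  rfl

theorem row_char (p2_sets : List (List Int)) (s1 : List Int)
    (d : PySem.Dict Int (List Int)) (hd : ∀ e, d.getD e [] = gOf p2_sets e) :
    (PySem.Set.ofList s1).foldl (fun row e =>
        (d.getD e []).foldl (fun row j => row.modify j 0 (fun n => n + 1)) row) PySem.Dict.empty
    = PySem.Dict.counter (LLof p2_sets s1) := by
  have : (PySem.Set.ofList s1).foldl (fun row e =>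
        (d.getD e []).foldl (fun row j => row.modify j 0 (fun n => n + 1)) row)
        (PySem.Dict.empty : PySem.Dict Int Int)
      = (PySem.Set.ofList s1).foldl (fun row e =>
        (gOf p2_sets e).foldl (fun row j => row.modify j 0 (fun n => n + 1)) row)
        (PySem.Dict.empty : PySem.Dict Int Int) := by
    apply PySem.List.foldl_congr_mem
    intro acc e _
    rw [hd]
  refine this.trans ?_
  rw [← List.foldl_flatMap, ← PySem.Dict.counter_eq_foldl]
  rfl

theorem satps_char (p1_sets p2_sets : List (List Int))
    (d : PySem.Dict Int (List Int)) (hd : ∀ e, d.getD e [] = gOf p2_sets e) :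
    ∀ st : Int × Int × Int × Int,
    p1_sets.foldl (fun st s1 =>
      (st.1 + ((PySem.Set.ofList s1).length : Int),
       st.2.1 + ((PySem.Set.ofList s1).foldl (fun rr e =>
          ((rr.1 + ((d.getD e []).length : Int),
            (d.getD e []).foldl (fun row j => row.modify j 0 (fun n => n + 1)) rr.2) : Int × PySem.Dict Int Int))
          ((0 : Int), PySem.Dict.empty)).1,
       st.2.2.1 + ((PySem.Set.ofList s1).length : Int) * ((PySem.Set.ofList s1).foldl (fun rr e =>
          ((rr.1 + ((d.getD e []).length : Int),
            (d.getD e []).foldl (fun row j => row.modify j 0 (fun n => n + 1)) rr.2) : Int × PySem.Dict Int Int))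
          ((0 : Int), PySem.Dict.empty)).1,
       st.2.2.2 + (((PySem.Set.ofList s1).foldl (fun rr e =>
          ((rr.1 + ((d.getD e []).length : Int),
            (d.getD e []).foldl (fun row j => row.modify j 0 (fun n => n + 1)) rr.2) : Int × PySem.Dict Int Int))
          ((0 : Int), PySem.Dict.empty)).2.values.foldl (fun s n => s + n * n) 0))) st
    = (st.1 + (p1_sets.map (fun s1 => ((PySem.Set.ofList s1).length : Int))).sum,
       st.2.1 + sP p1_sets p2_sets (fun s1 s2 => cNN s1 s2),
       st.2.2.1 + sP p1_sets p2_sets (fun s1 s2 => ((PySem.Set.ofList s1).length : Int) * cNN s1 s2),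
       st.2.2.2 + sP p1_sets p2_sets (fun s1 s2 => cNN s1 s2 * cNN s1 s2)) := by
  have hrr : ∀ s1 : List Int,
      (PySem.Set.ofList s1).foldl (fun rr e =>
          ((rr.1 + ((d.getD e []).length : Int),
            (d.getD e []).foldl (fun row j => row.modify j 0 (fun n => n + 1)) rr.2) : Int × PySem.Dict Int Int))
          ((0 : Int), PySem.Dict.empty)
      = ((p2_sets.map (fun s2 => cNN s1 s2)).sum, PySem.Dict.counter (LLof p2_sets s1)) := by
    intro s1
    rw [PySem.List.foldl_prod_mk (f := fun (acc : Int) (e : Int) => acc + ((d.getD e []).length : Int))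
        (g := fun (row : PySem.Dict Int Int) (e : Int) =>
          (d.getD e []).foldl (fun row j => row.modify j 0 (fun n => n + 1)) row)]
    rw [r_char p2_sets s1 d hd, row_char p2_sets s1 d hd]
  induction p1_sets with
  | nil => intro st; simp [sP]
  | cons h t ih =>
    intro st
    rw [List.foldl_cons, ih, hrr]
    have hmul : ((PySem.Set.ofList h).length : Int) * (p2_sets.map (fun s2 => cNN h s2)).sum
        = (p2_sets.map (fun s2 => ((PySem.Set.ofList h).length : Int) * cNN h s2)).sum := by
      rw [List.sum_map_mul_left]
    simp only [values_counter_sq, s'_char, sP, List.map_cons, List.sum_cons, Prod.mk.injEq]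
    refine ⟨by ring, by ring, ?_, by ring⟩
    rw [← hmul]
    ring

theorem sbq_char (p1_sets p2_sets : List (List Int))
    (d : PySem.Dict Int Int)
    (hd : ∀ e, d.getD e 0 = (p1_sets.map (fun s1 => if e ∈ PySem.Set.ofList s1 then (1 : Int) else 0)).sum) :
    p2_sets.foldl (fun st s2 =>
      (st.1 + ((PySem.Set.ofList s2).length : Int),
       st.2 + ((PySem.Set.ofList s2).length : Int) * ((PySem.Set.ofList s2).foldl (fun c e => c + d.getD e 0) 0)))
      ((0 : Int), (0 : Int))
    = ((p2_sets.map (fun s2 => ((PySem.Set.ofList s2).length : Int))).sum,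
       (p2_sets.map (fun s2 => ((PySem.Set.ofList s2).length : Int) * (p1_sets.map (fun s1 => cNN s1 s2)).sum)).sum) := by
  have hcol : ∀ s2 : List Int,
      (PySem.Set.ofList s2).foldl (fun c e => c + d.getD e 0) 0
      = (p1_sets.map (fun s1 => cNN s1 s2)).sum := by
    intro s2
    rw [PySem.List.foldl_add]
    simp only [hd, zero_add]
    rw [sum_swap_int]
    apply congrArg
    apply List.map_congr_left
    intro s1 _
    rw [indicator_sum, sym_cNN]
  rw [PySem.List.foldl_prod_mk (f := fun acc s2 => acc + ((PySem.Set.ofList s2).length : Int))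
      (g := fun acc s2 => acc + ((PySem.Set.ofList s2).length : Int) * ((PySem.Set.ofList s2).foldl (fun c e => c + d.getD e 0) 0))]
  rw [PySem.List.foldl_add, PySem.List.foldl_add]
  have h2' : (p2_sets.map (fun s2 => ((PySem.Set.ofList s2).length : Int) * ((PySem.Set.ofList s2).foldl (fun c e => c + d.getD e 0) 0))).sum
      = (p2_sets.map (fun s2 => ((PySem.Set.ofList s2).length : Int) * (p1_sets.map (fun s1 => cNN s1 s2)).sum)).sum := by
    apply congrArg
    apply List.map_congr_left
    intro s2 _
    rw [hcol]
  rw [h2']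
  simp

theorem B_char (p1_sets p2_sets : List (List Int)) :
    get_cross_tab_alt p1_sets p2_sets
    = [[sP p1_sets p2_sets (fun s1 s2 => cNN s1 s2 * cNN s1 s2) - sP p1_sets p2_sets (fun s1 s2 => cNN s1 s2),
        sP p1_sets p2_sets (fun s1 s2 => ((PySem.Set.ofList s1).length : Int) * cNN s1 s2) - sP p1_sets p2_sets (fun s1 s2 => cNN s1 s2 * cNN s1 s2)],
       [(p2_sets.map (fun s2 => ((PySem.Set.ofList s2).length : Int) * (p1_sets.map (fun s1 => cNN s1 s2)).sum)).sum - sP p1_sets p2_sets (fun s1 s2 => cNN s1 s2 * cNN s1 s2),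
        (p1_sets.map (fun s1 => ((PySem.Set.ofList s1).length : Int))).sum * (p2_sets.map (fun s2 => ((PySem.Set.ofList s2).length : Int))).sum
          - sP p1_sets p2_sets (fun s1 s2 => ((PySem.Set.ofList s1).length : Int) * cNN s1 s2)
          - (p2_sets.map (fun s2 => ((PySem.Set.ofList s2).length : Int) * (p1_sets.map (fun s1 => cNN s1 s2)).sum)).sum
          + sP p1_sets p2_sets (fun s1 s2 => cNN s1 s2 * cNN s1 s2)]] := by
  simp only [get_cross_tab_alt]
  rw [sbq_char p1_sets p2_sets _ (cnt1_getD p1_sets),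
      satps_char p1_sets p2_sets _ (index2_getD p2_sets)]
  simp

-- ===== final assembly =====

theorem sP_congr (p1_sets p2_sets : List (List Int)) (f g : List Int → List Int → Int)
    (h : ∀ s1 s2, f s1 s2 = g s1 s2) : sP p1_sets p2_sets f = sP p1_sets p2_sets g := by
  unfold sP
  apply congrArg
  apply List.map_congr_left
  intro s1 _
  apply congrArg
  apply List.map_congr_left
  intro s2 _
  exact h s1 s2

theorem sP_add (p1_sets p2_sets : List (List Int)) (f g : List Int → List Int → Int) :
    sP p1_sets p2_sets (fun a b => f a b + g a b) = sP p1_sets p2_sets f + sP p1_sets p2_sets g := by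
  unfold sP
  rw [← PySem.List.sum_map_add_int]
  apply congrArg
  apply List.map_congr_left
  intro s1 _
  rw [← PySem.List.sum_map_add_int]

theorem sP_sub (p1_sets p2_sets : List (List Int)) (f g : List Int → List Int → Int) :
    sP p1_sets p2_sets (fun a b => f a b - g a b) = sP p1_sets p2_sets f - sP p1_sets p2_sets g := by
  unfold sP
  rw [← sum_map_sub_int]
  apply congrArg
  apply List.map_congr_left
  intro s1 _
  rw [← sum_map_sub_int]

theorem Q_swap (p1_sets p2_sets : List (List Int)) :
    (p2_sets.map (fun s2 => ((PySem.Set.ofList s2).length : Int) * (p1_sets.map (fun s1 => cNN s1 s2)).sum)).sum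
    = sP p1_sets p2_sets (fun s1 s2 => ((PySem.Set.ofList s2).length : Int) * cNN s1 s2) := by
  unfold sP
  rw [sum_swap_int]
  apply congrArg
  apply List.map_congr_left
  intro s2 _
  rw [List.sum_map_mul_left]

theorem SASB (p1_sets p2_sets : List (List Int)) :
    (p1_sets.map (fun s1 => ((PySem.Set.ofList s1).length : Int))).sum * (p2_sets.map (fun s2 => ((PySem.Set.ofList s2).length : Int))).sum
    = sP p1_sets p2_sets (fun s1 s2 => ((PySem.Set.ofList s1).length : Int) * ((PySem.Set.ofList s2).length : Int)) := by
  unfold sP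
  rw [← List.sum_map_mul_right]
  apply congrArg
  apply List.map_congr_left
  intro s1 _
  rw [List.sum_map_mul_left]

-- ===== VERDICT (by name: the statement is the Claim_ definition above) =====
theorem get_cross_tab_spec : Claim_equal_get_cross_tab := by
  intro p1_sets p2_sets _
  unfold Spec_get_cross_tab
  rw [A_char, B_char, Q_swap, SASB]
  have e00 : sP p1_sets p2_sets (fun s1 s2 => cNN s1 s2 * (cNN s1 s2 - 1))
      = sP p1_sets p2_sets (fun s1 s2 => cNN s1 s2 * cNN s1 s2) - sP p1_sets p2_sets (fun s1 s2 => cNN s1 s2) := by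
    rw [← sP_sub]
    apply sP_congr
    intro s1 s2
    ring
  have e01 : sP p1_sets p2_sets (fun s1 s2 => (((PySem.Set.ofList s1).length : Int) - cNN s1 s2) * cNN s1 s2)
      = sP p1_sets p2_sets (fun s1 s2 => ((PySem.Set.ofList s1).length : Int) * cNN s1 s2) - sP p1_sets p2_sets (fun s1 s2 => cNN s1 s2 * cNN s1 s2) := by
    rw [← sP_sub]
    apply sP_congr
    intro s1 s2
    ring
  have e10 : sP p1_sets p2_sets (fun s1 s2 => cNN s1 s2 * (((PySem.Set.ofList s2).length : Int) - cNN s1 s2))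
      = sP p1_sets p2_sets (fun s1 s2 => ((PySem.Set.ofList s2).length : Int) * cNN s1 s2) - sP p1_sets p2_sets (fun s1 s2 => cNN s1 s2 * cNN s1 s2) := by
    rw [← sP_sub]
    apply sP_congr
    intro s1 s2
    ring
  have e11 : sP p1_sets p2_sets (fun s1 s2 => (((PySem.Set.ofList s1).length : Int) - cNN s1 s2) * (((PySem.Set.ofList s2).length : Int) - cNN s1 s2))
      = sP p1_sets p2_sets (fun s1 s2 => ((PySem.Set.ofList s1).length : Int) * ((PySem.Set.ofList s2).length : Int))
        - sP p1_sets p2_sets (fun s1 s2 => ((PySem.Set.ofList s1).length : Int) * cNN s1 s2)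
        - sP p1_sets p2_sets (fun s1 s2 => ((PySem.Set.ofList s2).length : Int) * cNN s1 s2)
        + sP p1_sets p2_sets (fun s1 s2 => cNN s1 s2 * cNN s1 s2) := by
    have : sP p1_sets p2_sets (fun s1 s2 => (((PySem.Set.ofList s1).length : Int) - cNN s1 s2) * (((PySem.Set.ofList s2).length : Int) - cNN s1 s2))
        = sP p1_sets p2_sets (fun s1 s2 => ((PySem.Set.ofList s1).length : Int) * ((PySem.Set.ofList s2).length : Int)
            - (((PySem.Set.ofList s1).length : Int) * cNN s1 s2
               + (((PySem.Set.ofList s2).length : Int) * cNN s1 s2 - cNN s1 s2 * cNN s1 s2))) := by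
      apply sP_congr
      intro s1 s2
      ring
    rw [this, sP_sub, sP_add, sP_sub]
    ring
  rw [e00, e01, e10, e11]
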